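-- pv_equiv track=rewrite | github.com/opnfv/cirv-sdv | sdv/docker/sdvstate/internal/validator/airship/compute_check.py | hex_to_comma_list
-- ===== SOURCE A (Python) =====
-- def hex_to_comma_list(hex_mask):
--     """
--     Converts CPU mask given in hex to list of cores
--     """
--     binary = bin(int(hex_mask, 16))[2:]
--     reversed_binary = binary[::-1]
--     i = 0
--     output = ""
--     for bit in reversed_binary:
--         if bit == '1':
--             output = output + str(i) + ','
--         i = i + 1
--     return output[:-1]
-- ===== SOURCE B (Python) =====
-- def hex_to_comma_list(hex_mask):
--     """
--     Converts CPU mask given in hex to list of cores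
--     """
--     n = int(hex_mask, 16)
--     cores = []
--     while n:
--         nxt = n & (n - 1)          # clear the lowest set bit
--         cores.append(str((n - nxt).bit_length() - 1))   # n - nxt isolates it
--         n = nxt
--     return ",".join(cores)
-- ===== Notes on version B (the rewrite author's own statement) =====
-- stated objective: alternative
-- what changed: Instead of formatting the whole number in binary, reversing it and scanning every bit position while growing the result by repeated string concatenation, B loops over the set bits only (clearing the lowest set bit with n & (n-1) and reading its position off the isolated bit's bit_length), collects the indices in a list and joins once (intended as faster; measured only 1.57x at the largest size both finished, so not claimed).
-- outside the precondition, e.g. on hex_to_comma_list('-2'): A returns '1', B does not finish within the time limit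
import Mathlib
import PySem

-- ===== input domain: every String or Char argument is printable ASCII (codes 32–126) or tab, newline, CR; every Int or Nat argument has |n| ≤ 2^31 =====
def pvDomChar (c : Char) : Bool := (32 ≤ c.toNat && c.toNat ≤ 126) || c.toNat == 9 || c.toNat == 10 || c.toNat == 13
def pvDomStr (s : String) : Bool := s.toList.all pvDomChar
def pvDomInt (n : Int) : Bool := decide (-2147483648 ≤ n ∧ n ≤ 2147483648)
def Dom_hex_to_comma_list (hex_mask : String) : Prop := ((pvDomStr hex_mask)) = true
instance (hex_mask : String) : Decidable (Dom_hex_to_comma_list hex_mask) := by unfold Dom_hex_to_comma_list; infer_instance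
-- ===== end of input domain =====

-- B replaces A's scan of every position of the reversed binary string (growing the output by
-- repeated string concatenation) with a loop over the set bits only (n & (n-1) clears the lowest
-- set bit, its position is read off the isolated bit's bit_length) and a single join at the end.

-- ===== PORT A =====
-- 'i = 0; output = ""; for bit in reversed_binary: if bit == '1': output = output + str(i) + ','; i = i + 1'
-- ported over List Char (PySem.Chars is the exact model of Python str on this domain)
def hexLoopA : List Char → Int → List Char → List Char
  | [], _, out => out
  | bit :: rest, i, out =>
      hexLoopA rest (i + 1) (if bit = '1' then out ++ PySem.Int.toChars i ++ [','] else out)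

def hex_to_comma_list (hex_mask : String) : String :=
  match PySem.Int.ofStrBase? hex_mask 16 with
  | none => ""   -- int(hex_mask, 16) raises ValueError here; excluded by Pre_
  | some n =>
      let binary := (PySem.Int.toBinChars0b n).drop 2          -- bin(int(hex_mask,16))[2:]  (drop 2 = slice [2:])
      let reversedBinary := binary.reverse                      -- [::-1]
      String.ofList ((hexLoopA reversedBinary 0 []).dropLast)   -- output[:-1] (dropLast = slice [:-1])

-- ===== PORT B =====
-- 'while n: nxt = n & (n - 1); cores.append(str((n - nxt).bit_length() - 1)); n = nxt'
-- fuel only makes the while-loop total; n.toNat + 1 steps always suffice on Pre_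
def hexLoopB : Nat → Int → List String → List String
  | 0, _, cores => cores
  | fuel + 1, n, cores =>
      if n = 0 then cores
      else
        let nxt := PySem.Int.band n (n - 1)
        hexLoopB fuel nxt
          (cores ++ [PySem.Int.toStr ((PySem.Int.bitLength (n - nxt) : Int) - 1)])

def hex_to_comma_list_alt (hex_mask : String) : String :=
  match PySem.Int.ofStrBase? hex_mask 16 with
  | none => ""
  | some n => PySem.Str.join "," (hexLoopB (n.toNat + 1) n [])

-- ===== PRECONDITION & SPEC =====
-- Pre_ excludes the strings int(hex_mask, 16) rejects (A raises ValueError) and negative masks,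
-- where A's bin(n)[2:] accidentally slices '-0b…' to 'b…' while B's bit-clearing loop never terminates.
def Pre_hex_to_comma_list (hex_mask : String) : Prop :=
  0 ≤ (PySem.Int.ofStrBase? hex_mask 16).getD (-1)
instance (hex_mask : String) : Decidable (Pre_hex_to_comma_list hex_mask) := by
  unfold Pre_hex_to_comma_list; infer_instance

def pvWitness_hex_to_comma_list : String := "1f"

def Spec_hex_to_comma_list (hex_mask : String) (out : String) : Prop :=
  out = hex_to_comma_list_alt hex_mask
instance (hex_mask : String) (out : String) : Decidable (Spec_hex_to_comma_list hex_mask out) := by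
  unfold Spec_hex_to_comma_list; infer_instance

-- ===== CLAIM (what is proved, stated in full; the proofs are below) =====
def Claim_equal_hex_to_comma_list : Prop :=
  ∀ (hex_mask : String), Dom_hex_to_comma_list hex_mask → Pre_hex_to_comma_list hex_mask →
    Spec_hex_to_comma_list hex_mask (hex_to_comma_list hex_mask)

-- ===== LEMMAS AND PROOFS =====

-- binary digits of m, most significant first: what Nat.toDigits 2 produces
def binGo (m : Nat) : List Char :=
  if m / 2 = 0 then [Nat.digitChar (m % 2)]
  else binGo (m / 2) ++ [Nat.digitChar (m % 2)]
decreasing_by exact Nat.div_lt_self (by omega) one_lt_two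

-- set-bit indices of m, ascending
def idxNats (m : Nat) : List Nat :=
  if m = 0 then []
  else (if m % 2 = 1 then [0] else []) ++ (idxNats (m / 2)).map (· + 1)
decreasing_by exact Nat.div_lt_self (by omega) one_lt_two

-- the rendered index strings A accumulates, offset i
def idxs (m : Nat) (i : Int) : List (List Char) :=
  if m = 0 then []
  else (if m % 2 = 1 then [PySem.Int.toChars i] else []) ++ idxs (m / 2) (i + 1)
decreasing_by exact Nat.div_lt_self (by omega) one_lt_two

theorem idxs_zero (i : Int) : idxs 0 i = [] := by rw [idxs]; simp
theorem idxNats_zero : idxNats 0 = [] := by rw [idxNats]; simp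

theorem toDigitsCore_eq_binGo (fuel : Nat) : ∀ m ds, m < fuel →
    Nat.toDigitsCore 2 fuel m ds = binGo m ++ ds := by
  induction fuel with
  | zero => omega
  | succ f ih =>
      intro m ds h
      rw [Nat.toDigitsCore, binGo]
      by_cases h2 : m / 2 = 0
      · simp [h2]
      · simp only [h2, if_false]
        rw [ih (m / 2) _ (by omega)]
        simp

theorem toDigits_eq_binGo (m : Nat) : Nat.toDigits 2 m = binGo m := by
  rw [Nat.toDigits, toDigitsCore_eq_binGo (m + 1) m [] (by omega)]
  simp

theorem hexLoopA_eq (m : Nat) : ∀ (i : Int) (out : List Char),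
    hexLoopA ((binGo m).reverse) i out
      = out ++ (idxs m i).flatMap (fun s => s ++ [',']) := by
  induction m using Nat.strong_induction_on with
  | _ m ih =>
      intro i out
      rw [binGo, idxs]
      by_cases h2 : m / 2 = 0
      · have hm : m = 0 ∨ m = 1 := by omega
        rcases hm with hm | hm <;> subst hm <;>
          simp [hexLoopA, idxs_zero, show Nat.digitChar 1 = '1' from rfl,
            show ¬ (Nat.digitChar 0 = '1') by decide]
      · have hm0 : m ≠ 0 := by omega
        simp only [h2, if_false, hm0, List.reverse_append, List.reverse_singleton,
          List.singleton_append]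
        rw [hexLoopA]
        rw [ih (m / 2) (Nat.div_lt_self (by omega) one_lt_two) (i + 1)]
        rcases Nat.mod_two_eq_zero_or_one m with hp | hp <;>
          simp [hp, show Nat.digitChar 1 = '1' from rfl,
            show ¬ (Nat.digitChar 0 = '1') by decide]

theorem idxs_eq_idxNats (m : Nat) : ∀ i : Int,
    idxs m i = (idxNats m).map (fun (k : Nat) => PySem.Int.toChars (i + (k : Int))) := by
  induction m using Nat.strong_induction_on with
  | _ m ih =>
      intro i
      rw [idxs, idxNats]
      by_cases hm : m = 0
      · simp [hm]
      · simp only [hm, if_false, List.map_append]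
        rw [ih (m / 2) (Nat.div_lt_self (by omega) one_lt_two) (i + 1)]
        congr 1
        · rcases Nat.mod_two_eq_zero_or_one m with hp | hp <;> simp [hp]
        · simp only [List.map_map]
          apply List.map_congr_left
          intro k _
          simp only [Function.comp]
          congr 1
          push_cast
          ring

def nxtN (m : Nat) : Nat := m &&& (m - 1)

theorem and_double_left (a b : Nat) : (2*a) &&& (2*b+1) = 2*(a &&& b) := by
  have := @Nat.bitwise_bit and rfl false a true b
  simpa [Nat.bit, Nat.land, two_mul, Nat.mul_comm] using this

theorem and_double_right (a b : Nat) : (2*a+1) &&& (2*b) = 2*(a &&& b) := by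
  have := @Nat.bitwise_bit and rfl true a false b
  simpa [Nat.bit, Nat.land, two_mul, Nat.mul_comm] using this

theorem and_odd_pred (m : Nat) (h : m % 2 = 1) : nxtN m = m - 1 := by
  have hm : m = 2 * (m / 2) + 1 := by omega
  unfold nxtN
  conv_lhs => rw [hm]
  simp only [Nat.add_sub_cancel]
  rw [and_double_right, Nat.and_self]
  omega

theorem and_even_pred (k : Nat) (h : k ≠ 0) : nxtN (2 * k) = 2 * nxtN k := by
  have hk : 2 * k - 1 = 2 * (k - 1) + 1 := by omega
  unfold nxtN
  rw [hk, and_double_left]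

theorem nxtN_le (m : Nat) : nxtN m ≤ m - 1 := Nat.and_le_right

theorem nxtN_lt (m : Nat) (h : m ≠ 0) : nxtN m < m := by
  have := nxtN_le m; omega

theorem bitLength_pos (l : Nat) (h : l ≠ 0) : 1 ≤ PySem.Int.bitLength (l : Int) := by
  rw [PySem.Int.bitLength_natCast (by omega : 0 < l)]; omega

theorem bitLength_double (l : Nat) (h : l ≠ 0) :
    PySem.Int.bitLength ((2 * l : Nat) : Int) = PySem.Int.bitLength (l : Int) + 1 := by
  rw [PySem.Int.bitLength_natCast (by omega : 0 < 2 * l)]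
  congr 2
  omega

theorem idxNats_double (e : Nat) : idxNats (2 * e) = (idxNats e).map (· + 1) := by
  by_cases he : e = 0
  · subst he; simp [idxNats_zero]
  · conv_lhs => rw [idxNats]
    rw [if_neg (by omega : ¬ (2 * e = 0)), if_neg (by omega : ¬ (2 * e % 2 = 1)),
      (by omega : 2 * e / 2 = e)]
    simp

theorem idxNats_lsb (m : Nat) (h : m ≠ 0) :
    idxNats m = (PySem.Int.bitLength ((m - nxtN m : Nat) : Int) - 1) :: idxNats (nxtN m) := by
  induction m using Nat.strong_induction_on with
  | _ m ih =>
      rcases Nat.mod_two_eq_zero_or_one m with hp | hp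
      · obtain ⟨d, rfl⟩ : ∃ d, m = 2 * d := ⟨m / 2, by omega⟩
        have hd : d ≠ 0 := by omega
        have hrec := ih d (by omega) hd
        have hnx : nxtN (2 * d) = 2 * nxtN d := and_even_pred d hd
        have hlp : d - nxtN d ≠ 0 := by have := nxtN_le d; omega
        have hbl2 : PySem.Int.bitLength ((2 * d - 2 * nxtN d : Nat) : Int)
            = PySem.Int.bitLength ((d - nxtN d : Nat) : Int) + 1 := by
          rw [(by omega : 2 * d - 2 * nxtN d = 2 * (d - nxtN d))]
          exact bitLength_double _ hlp
        rw [idxNats_double d, hrec, hnx, idxNats_double (nxtN d), hbl2]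
        simp only [List.map_cons]
        congr 1
        have := bitLength_pos _ hlp
        omega
      · have hnx : nxtN m = m - 1 := and_odd_pred m hp
        rw [hnx, (show m - (m - 1) = 1 by omega)]
        have h1 : PySem.Int.bitLength ((1 : Nat) : Int) = 1 := by decide
        rw [h1]
        norm_num
        conv_lhs => rw [idxNats]
        simp only [h, if_false, hp, if_true, List.singleton_append]
        by_cases h1m : m = 1
        · subst h1m
          simp [idxNats_zero]
        · conv_rhs => rw [idxNats]
          rw [if_neg (by omega : ¬ (m - 1 = 0)), if_neg (by omega : ¬ ((m - 1) % 2 = 1)),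
            (by omega : (m - 1) / 2 = m / 2)]
          simp

theorem hexLoopB_eq (m : Nat) : ∀ fuel, m < fuel → ∀ cores,
    hexLoopB fuel (m : Int) cores
      = cores ++ (idxNats m).map (fun (k : Nat) => PySem.Int.toStr (k : Int)) := by
  induction m using Nat.strong_induction_on with
  | _ m ih =>
      intro fuel hf cores
      obtain ⟨f, rfl⟩ : ∃ f, fuel = f + 1 := ⟨fuel - 1, by omega⟩
      by_cases hm : m = 0
      · subst hm; simp [hexLoopB, idxNats_zero]
      · rw [hexLoopB]
        simp only [show ¬ ((m : Int) = 0) by exact_mod_cast hm, if_false]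
        have hsub : (m : Int) - 1 = ((m - 1 : Nat) : Int) := by
          have : 1 ≤ m := by omega
          push_cast [this]; ring
        have hband : PySem.Int.band (m : Int) ((m : Int) - 1) = ((nxtN m : Nat) : Int) := by
          rw [hsub, PySem.Int.band_natCast]; rfl
        have hlowc : (m : Int) - ((nxtN m : Nat) : Int) = ((m - nxtN m : Nat) : Int) := by
          push_cast [Nat.cast_sub (by have := nxtN_le m; omega : nxtN m ≤ m)]; ring
        have hcast : ((PySem.Int.bitLength ((m - nxtN m : Nat) : Int) : Int) - 1)
            = (((PySem.Int.bitLength ((m - nxtN m : Nat) : Int) - 1 : Nat)) : Int) := by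
          have := bitLength_pos (m - nxtN m) (by have := nxtN_le m; omega)
          omega
        rw [hband, hlowc, hcast, ih (nxtN m) (nxtN_lt m hm) f (by have := nxtN_lt m hm; omega)]
        rw [idxNats_lsb m hm]
        simp

theorem flatMap_comma_dropLast (L : List (List Char)) :
    (L.flatMap (fun s => s ++ [','])).dropLast = PySem.Chars.join [','] L := by
  induction L with
  | nil => simp [PySem.Chars.join_nil]
  | cons p rest ih =>
      cases rest with
      | nil => simp [PySem.Chars.join_singleton]
      | cons q t =>
          rw [PySem.Chars.join_cons_cons]
          rw [List.flatMap_cons]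
          rw [show (p ++ [',']) ++ (q :: t).flatMap (fun s => s ++ [','])
              = p ++ ([','] ++ (q :: t).flatMap (fun s => s ++ [','])) by simp]
          rw [List.dropLast_append_of_ne_nil (by simp)]
          rw [show ([','] ++ (q :: t).flatMap (fun s => s ++ [','])).dropLast
              = [','] ++ ((q :: t).flatMap (fun s => s ++ [','])).dropLast by
            rw [List.dropLast_append_of_ne_nil (by simp)]]
          rw [ih]
          simp

theorem hexLoopA_hexLoopB (m : Nat) :
    String.ofList ((hexLoopA (((PySem.Int.toBinChars0b (m : Int)).drop 2).reverse) 0 []).dropLast)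
      = PySem.Str.join "," (hexLoopB (m + 1) (m : Int) []) := by
  have hbin : ((PySem.Int.toBinChars0b (m : Int)).drop 2) = binGo m := by
    rw [PySem.Int.toBinChars0b]
    rw [if_neg (by omega : ¬ ((m : Int) < 0))]
    simp [toDigits_eq_binGo]
  rw [hbin, hexLoopA_eq m 0 [], List.nil_append, idxs_eq_idxNats m 0]
  simp only [zero_add]
  rw [flatMap_comma_dropLast, hexLoopB_eq m (m + 1) (by omega) [], List.nil_append]
  rw [PySem.Str.join, List.map_map,
    (show (",").toList = [','] from rfl)]
  congr 2
  apply List.map_congr_left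
  intro k _
  simp [PySem.Int.toList_toStr]

-- ===== VERDICT (by name: the statement is the Claim_ definition above) =====
theorem hex_to_comma_list_spec : Claim_equal_hex_to_comma_list := by
  intro hex_mask _ hPre
  unfold Spec_hex_to_comma_list hex_to_comma_list hex_to_comma_list_alt
  unfold Pre_hex_to_comma_list at hPre
  cases hOf : PySem.Int.ofStrBase? hex_mask 16 with
  | none => simp [hOf] at hPre ⊢
  | some n =>
      rw [hOf] at hPre
      simp only [Option.getD_some] at hPre
      lift n to ℕ using hPre with m
      simpa using hexLoopA_hexLoopB m
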